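-- pv_equiv track=rewrite | github.com/chunyaoma/Major-flow-identification | loaddata.py | track_cluster_changes
-- ===== SOURCE A (Python) =====
-- def track_cluster_changes(previous_clusters, new_clusters, previous_labels):
--     matched_clusters = {}  # Map new clusters to old labels
--     disappeared_clusters = set(previous_clusters.keys())  # Start with all old clusters
--     new_formed_clusters = set(new_clusters.keys())
--
--     used_labels = set(previous_labels.values())  # Track all used labels
--     next_new_label = max(used_labels, default=-1) + 1  # Get next available label
--
--     for new_label, new_points in new_clusters.items():
--         best_match = None
--         max_overlap = 0
--
--         for old_label, old_points in previous_clusters.items():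
--             overlap = len(new_points & old_points)  # Find common waypoints
--             if overlap > max_overlap:
--                 max_overlap = overlap
--                 best_match = old_label
--
--         if best_match is not None:
--             # Assign the old label to the new cluster
--             matched_clusters[new_label] = best_match# previous_labels[best_match]
--             disappeared_clusters.discard(best_match)  # Remove from disappeared list
--         else:
--             # Assign a new unique label to clusters with no match
--             matched_clusters[new_label] = next_new_label
--             new_formed_clusters.add(next_new_label)
--             used_labels.add(next_new_label)
--             next_new_label += 1
--
--     return matched_clusters, new_formed_clusters, disappeared_clusters
-- ===== SOURCE B (Python) =====
-- def track_cluster_changes(previous_clusters, new_clusters, previous_labels):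
--     # Inverted index: point -> list of old labels whose cluster contains it.
--     inv = {}
--     for old_label, old_points in previous_clusters.items():
--         for p in old_points:
--             inv.setdefault(p, []).append(old_label)
--
--     next_new_label = max(previous_labels.values(), default=-1) + 1
--     matched = {}
--     matched_old = set()
--     fresh = []
--     for new_label, new_points in new_clusters.items():
--         # Tally overlap counts for this new cluster in one pass over its points.
--         counts = {}
--         for p in new_points:
--             for ol in inv.get(p, ()):
--                 counts[ol] = counts.get(ol, 0) + 1
--         best = None
--         max_overlap = 0
--         for old_label in previous_clusters:
--             c = counts.get(old_label, 0)
--             if c > max_overlap: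
--                 max_overlap = c
--                 best = old_label
--         if best is not None:
--             matched[new_label] = best
--             matched_old.add(best)
--         else:
--             matched[new_label] = next_new_label
--             fresh.append(next_new_label)
--             next_new_label += 1
--     disappeared = {ol for ol in previous_clusters if ol not in matched_old}
--     new_formed = set(new_clusters.keys())
--     new_formed.update(fresh)
--     return matched, new_formed, disappeared
-- ===== Notes on version B (the rewrite author's own statement) =====
-- stated objective: faster
-- what changed: Replaces the per-(new,old) cluster set-intersection inner loop by a point->old-label inverted index built once, so each new cluster's overlaps are tallied in one pass over its own points and the best match is read off from the tally.
import Mathlib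
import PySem

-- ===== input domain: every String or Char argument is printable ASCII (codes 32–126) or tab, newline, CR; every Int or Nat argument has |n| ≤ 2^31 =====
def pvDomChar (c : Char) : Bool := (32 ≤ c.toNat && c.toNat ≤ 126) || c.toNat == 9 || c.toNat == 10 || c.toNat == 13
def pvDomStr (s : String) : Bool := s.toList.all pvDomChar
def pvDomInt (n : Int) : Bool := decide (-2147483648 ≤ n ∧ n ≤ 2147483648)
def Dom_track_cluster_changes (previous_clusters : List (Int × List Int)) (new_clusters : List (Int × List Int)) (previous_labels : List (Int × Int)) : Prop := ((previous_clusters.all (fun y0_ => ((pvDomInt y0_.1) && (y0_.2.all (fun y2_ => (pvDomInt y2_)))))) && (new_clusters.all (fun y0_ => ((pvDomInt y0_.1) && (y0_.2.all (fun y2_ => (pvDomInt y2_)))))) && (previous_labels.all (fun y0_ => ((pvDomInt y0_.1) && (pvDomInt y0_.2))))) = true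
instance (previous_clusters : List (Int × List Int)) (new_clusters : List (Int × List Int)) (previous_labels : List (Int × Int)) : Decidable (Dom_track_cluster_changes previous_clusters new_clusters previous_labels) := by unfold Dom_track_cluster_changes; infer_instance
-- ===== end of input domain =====

-- B replaces A's per-(new,old) set-intersection inner loop by a point→old-label inverted index
-- built once, tallying each new cluster's overlap counts in one pass over its points (objective: faster).

-- ===== PORT A =====
-- overlap = len(new_points & old_points)
def pvAOverlap (pts opts : List Int) : Int :=
  ((PySem.Set.inter (PySem.Set.ofList pts) (PySem.Set.ofList opts)).length : Int)

-- the inner 'for old_label, old_points in previous_clusters.items():' loop of A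
def pvASelect (previous_clusters : List (Int × List Int)) (pts : List Int) : Option Int × Int :=
  previous_clusters.foldl (fun bm o =>
    let overlap := pvAOverlap pts o.2
    if overlap > bm.2 then (some o.1, overlap) else bm) (none, 0)

-- one iteration of A's main loop; state = (matched, disappeared, new_formed, used_labels, next_new_label)
def pvStepA (previous_clusters : List (Int × List Int))
    (st : PySem.Dict Int Int × PySem.Set Int × PySem.Set Int × PySem.Set Int × Int)
    (e : Int × List Int) :
    PySem.Dict Int Int × PySem.Set Int × PySem.Set Int × PySem.Set Int × Int :=
  let bm := pvASelect previous_clusters e.2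
  match bm.1 with
  | some b => (st.1.insert e.1 b, PySem.Set.discard st.2.1 b, st.2.2.1, st.2.2.2.1, st.2.2.2.2)
  | none => (st.1.insert e.1 st.2.2.2.2, st.2.1, PySem.Set.add st.2.2.1 st.2.2.2.2,
             PySem.Set.add st.2.2.2.1 st.2.2.2.2, st.2.2.2.2 + 1)

def track_cluster_changes (previous_clusters : List (Int × List Int)) (new_clusters : List (Int × List Int)) (previous_labels : List (Int × Int)) : (List (Int × Int)) × List Int × List Int :=
  let used := PySem.Set.ofList (previous_labels.map Prod.snd)
  let next : Int := ((PySem.List.max? used (fun x => x)).getD (-1)) + 1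
  let st := new_clusters.foldl (pvStepA previous_clusters)
    (PySem.Dict.empty, PySem.Set.ofList (previous_clusters.map Prod.fst),
     PySem.Set.ofList (new_clusters.map Prod.fst), used, next)
  (st.1.items, st.2.2.1, st.2.1)

-- ===== PORT B =====
-- inverted index: for old_label, old_points: for p in old_points: inv.setdefault(p, []).append(old_label)
def pvBInv (previous_clusters : List (Int × List Int)) : PySem.Dict Int (List Int) :=
  previous_clusters.foldl (fun d o =>
    (PySem.Set.ofList o.2).foldl (fun d p => d.modify p [] (fun v => v ++ [o.1])) d)
    PySem.Dict.empty

-- counts = {}; for p in new_points: for ol in inv.get(p, ()): counts[ol] = counts.get(ol, 0) + 1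
def pvBCounts (inv : PySem.Dict Int (List Int)) (pts : List Int) : PySem.Dict Int Int :=
  (PySem.Set.ofList pts).foldl (fun c p =>
    (inv.getD p []).foldl (fun c ol => c.insert ol (c.getD ol 0 + 1)) c)
    PySem.Dict.empty

-- for old_label in previous_clusters: c = counts.get(old_label, 0); keep the first strict maximum
def pvBSelect (prevKeys : List Int) (counts : PySem.Dict Int Int) : Option Int × Int :=
  prevKeys.foldl (fun bm ol =>
    let c := counts.getD ol 0
    if c > bm.2 then (some ol, c) else bm) (none, 0)

-- one iteration of B's main loop; state = (matched, matched_old, fresh, next_new_label)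
def pvStepB (previous_clusters : List (Int × List Int)) (inv : PySem.Dict Int (List Int))
    (st : PySem.Dict Int Int × PySem.Set Int × List Int × Int) (e : Int × List Int) :
    PySem.Dict Int Int × PySem.Set Int × List Int × Int :=
  let bm := pvBSelect (previous_clusters.map Prod.fst) (pvBCounts inv e.2)
  match bm.1 with
  | some b => (st.1.insert e.1 b, PySem.Set.add st.2.1 b, st.2.2.1, st.2.2.2)
  | none => (st.1.insert e.1 st.2.2.2, st.2.1, st.2.2.1 ++ [st.2.2.2], st.2.2.2 + 1)

def track_cluster_changes_alt (previous_clusters : List (Int × List Int)) (new_clusters : List (Int × List Int)) (previous_labels : List (Int × Int)) : (List (Int × Int)) × List Int × List Int :=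
  let inv := pvBInv previous_clusters
  let next0 : Int := ((PySem.List.max? (previous_labels.map Prod.snd) (fun x => x)).getD (-1)) + 1
  let st := new_clusters.foldl (pvStepB previous_clusters inv)
    (PySem.Dict.empty, PySem.Set.empty, [], next0)
  let disappeared := PySem.Set.ofList
    ((previous_clusters.map Prod.fst).filter (fun ol => !(PySem.Set.contains st.2.1 ol)))
  let new_formed := st.2.2.1.foldl PySem.Set.add (PySem.Set.ofList (new_clusters.map Prod.fst))
  (st.1.items, new_formed, disappeared)

-- ===== PRECONDITION & SPEC =====
-- Pre_ excludes association lists with a duplicated dict key: such lists represent no Python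
-- dict input (a Python dict collapses duplicate keys), so A's behaviour there is not defined by A.
def Pre_track_cluster_changes (previous_clusters : List (Int × List Int)) (new_clusters : List (Int × List Int)) (previous_labels : List (Int × Int)) : Prop :=
  (previous_clusters.map Prod.fst).Nodup ∧ (new_clusters.map Prod.fst).Nodup ∧ (previous_labels.map Prod.fst).Nodup
instance (previous_clusters : List (Int × List Int)) (new_clusters : List (Int × List Int)) (previous_labels : List (Int × Int)) : Decidable (Pre_track_cluster_changes previous_clusters new_clusters previous_labels) := by unfold Pre_track_cluster_changes; infer_instance

def pvWitness_track_cluster_changes : (List (Int × List Int)) × (List (Int × List Int)) × (List (Int × Int)) :=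
  ([(0, [1, 2]), (1, [3])], [(4, [2, 5]), (5, [9])], [(0, 0), (1, 1)])

def Spec_track_cluster_changes (previous_clusters : List (Int × List Int)) (new_clusters : List (Int × List Int)) (previous_labels : List (Int × Int)) (out : (List (Int × Int)) × List Int × List Int) : Prop := out = track_cluster_changes_alt previous_clusters new_clusters previous_labels
instance (previous_clusters : List (Int × List Int)) (new_clusters : List (Int × List Int)) (previous_labels : List (Int × Int)) (out : (List (Int × Int)) × List Int × List Int) : Decidable (Spec_track_cluster_changes previous_clusters new_clusters previous_labels out) := by unfold Spec_track_cluster_changes; infer_instance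

-- ===== CLAIM (what is proved, stated in full; the proofs are below) =====
def Claim_equal_track_cluster_changes : Prop := ∀ (previous_clusters : List (Int × List Int)) (new_clusters : List (Int × List Int)) (previous_labels : List (Int × Int)), Dom_track_cluster_changes previous_clusters new_clusters previous_labels → Pre_track_cluster_changes previous_clusters new_clusters previous_labels → Spec_track_cluster_changes previous_clusters new_clusters previous_labels (track_cluster_changes previous_clusters new_clusters previous_labels)

-- ===== LEMMAS AND PROOFS =====

-- max over set(xs) = max over xs (Python's max is order-independent on Int)
lemma pv_max_ofList (xs : List Int) :
    PySem.List.max? (PySem.Set.ofList xs) (fun x => x) = PySem.List.max? xs (fun x => x) := by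
  cases h1 : PySem.List.max? (PySem.Set.ofList xs) (fun x => x) with
  | none =>
    rw [PySem.List.max?_eq_none_iff] at h1
    have hnil : xs = [] := by
      cases xs with
      | nil => rfl
      | cons a t =>
        exfalso
        have ha : a ∈ PySem.Set.ofList (a :: t) := (PySem.Set.mem_ofList _ _).mpr (by simp)
        rw [h1] at ha
        simp at ha
    subst hnil
    rw [eq_comm, PySem.List.max?_eq_none_iff]
  | some m =>
    cases h2 : PySem.List.max? xs (fun x => x) with
    | none =>
      rw [PySem.List.max?_eq_none_iff] at h2
      subst h2
      rw [PySem.Set.ofList_nil] at h1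
      rw [show (PySem.List.max? ([] : List Int) (fun x => x)) = none from
        (PySem.List.max?_eq_none_iff _ _).mpr rfl] at h1
      exact absurd h1 (by simp)
    | some m' =>
      have hm : m ∈ xs := (PySem.Set.mem_ofList _ _).mp (PySem.List.max?_mem h1)
      have hm' : m' ∈ PySem.Set.ofList xs := (PySem.Set.mem_ofList _ _).mpr (PySem.List.max?_mem h2)
      have h3 := PySem.List.max?_isMax h1 m' hm'
      have h4 := PySem.List.max?_isMax h2 m hm
      simp only at h3 h4
      have : m = m' := le_antisymm h4 h3
      rw [this]

-- first occurrence dedup commutes with filter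
lemma pv_filter_ofList (p : Int → Bool) (l : List Int) :
    List.filter p (PySem.Set.ofList l) = PySem.Set.ofList (l.filter p) := by
  induction l using List.reverseRecOn with
  | nil => simp [PySem.Set.ofList_nil]
  | append_singleton l x ih =>
    rw [PySem.Set.ofList_append_singleton, List.filter_append]
    by_cases hpx : p x
    · rw [show List.filter p [x] = [x] from by simp [hpx]]
      rw [PySem.Set.ofList_append_singleton]
      by_cases hmem : x ∈ l
      · have hx2 : x ∈ List.filter p l := List.mem_filter.mpr ⟨hmem, hpx⟩
        simp [PySem.Set.add, hmem, hx2, ih]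
      · have hx2 : x ∉ List.filter p l := fun h => hmem (List.mem_filter.mp h).1
        simp [PySem.Set.add, hmem, hx2, ih, List.filter_append, hpx]
    · rw [show List.filter p [x] = [] from by simp [hpx]]
      rw [List.append_nil]
      by_cases hmem : x ∈ l
      · simp [PySem.Set.add, hmem, ih]
      · simp [PySem.Set.add, hmem, ih, List.filter_append, hpx]

lemma pv_discard_step (ks : List Int) (S : PySem.Set Int) (b : Int) :
    PySem.Set.discard (PySem.Set.ofList (ks.filter (fun ol => !(PySem.Set.contains S ol)))) b
      = PySem.Set.ofList (ks.filter (fun ol => !(PySem.Set.contains (PySem.Set.add S b) ol))) := by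
  show List.filter _ _ = _
  rw [pv_filter_ofList, List.filter_filter]
  congr 1
  apply List.filter_congr
  intro ol _
  have hadd : PySem.Set.contains (PySem.Set.add S b) ol
      = (PySem.Set.contains S ol || ol == b) := by
    rw [Bool.eq_iff_iff]
    simp only [Bool.or_eq_true, beq_iff_eq, PySem.Set.contains_iff, PySem.Set.mem_add]
  rw [hadd]
  cases h1 : PySem.Set.contains S ol <;> cases h2 : (ol == b) <;> simp


lemma pv_sum_unique (f : (Int × List Int) → Nat) :
    ∀ (prev : List (Int × List Int)), (prev.map Prod.fst).Nodup → ∀ {ol : Int} {opts : List Int},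
    (ol, opts) ∈ prev → (∀ o ∈ prev, o.1 ≠ ol → f o = 0) → (prev.map f).sum = f (ol, opts) := by
  intro prev
  induction prev with
  | nil => intro _ ol opts hm; exact absurd hm (by simp)
  | cons o t ih =>
    intro hk ol opts hm hf
    rw [List.map_cons, List.nodup_cons] at hk
    rcases List.mem_cons.mp hm with h | h
    · subst h
      simp only [List.map_cons, List.sum_cons]
      have hz : (t.map f).sum = 0 := by
        apply List.sum_eq_zero
        intro x hx
        obtain ⟨o', ho', rfl⟩ := List.mem_map.mp hx
        apply hf o' (List.mem_cons_of_mem _ ho')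
        intro hol
        exact hk.1 (List.mem_map.mpr ⟨o', ho', hol⟩)
      rw [hz]
      simp
    · have ho : o.1 ≠ ol := by
        intro hol
        exact hk.1 (List.mem_map.mpr ⟨(ol, opts), h, hol.symm ▸ rfl⟩)
      simp only [List.map_cons, List.sum_cons]
      rw [hf o (List.mem_cons_self) ho, ih hk.2 h (fun o' ho' => hf o' (List.mem_cons_of_mem _ ho')),
        Nat.zero_add]

lemma pv_sum_congr_unique (prev : List (Int × List Int)) (hk : (prev.map Prod.fst).Nodup)
    {ol : Int} {opts : List Int} (hm : (ol, opts) ∈ prev) (p : Int)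
    (F : (Int × List Int) → Nat)
    (h : ∀ o ∈ prev, F o = if o.1 = ol then (if p ∈ o.2 then 1 else 0) else 0) :
    (prev.map F).sum = if p ∈ opts then 1 else 0 := by
  rw [List.map_congr_left h,
    pv_sum_unique _ prev hk hm (by intro o _ ho; simp [ho])]
  simp

lemma pv_countP_pair (o : Int × List Int) (ol p : Int) :
    List.countP (fun pr : Int × Int => pr.2 == ol && pr.1 == p)
      ((PySem.Set.ofList o.2).map (fun q => (q, o.1)))
      = if o.1 = ol then (if p ∈ o.2 then 1 else 0) else 0 := by
  rw [List.countP_map]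
  by_cases ho : o.1 = ol
  · have h1 : List.countP ((fun pr : Int × Int => pr.2 == ol && pr.1 == p) ∘ fun q => (q, o.1))
        (PySem.Set.ofList o.2) = List.countP (fun q => q == p) (PySem.Set.ofList o.2) :=
      List.countP_congr (by intro x _; simp [ho])
    rw [h1, if_pos ho, ← List.count_eq_countP]
    by_cases hp : p ∈ o.2
    · rw [if_pos hp]
      exact List.count_eq_one_of_mem (PySem.Set.nodup_ofList _) ((PySem.Set.mem_ofList _ _).mpr hp)
    · rw [if_neg hp]
      exact List.count_eq_zero_of_not_mem (fun h => hp ((PySem.Set.mem_ofList _ _).mp h))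
  · have h1 : List.countP ((fun pr : Int × Int => pr.2 == ol && pr.1 == p) ∘ fun q => (q, o.1))
        (PySem.Set.ofList o.2) = List.countP (fun _ => false) (PySem.Set.ofList o.2) :=
      List.countP_congr (by intro x _; simp [ho])
    rw [h1, if_neg ho]
    simp

lemma pv_foldl_nested {β γ : Type} (g : Int → List γ) (step : β → γ → β) (l : List Int) (init : β) :
    l.foldl (fun c x => (g x).foldl step c) init = (l.flatMap g).foldl step init := by
  rw [List.flatMap_def, List.foldl_flatten, List.foldl_map]

lemma pv_sum_indicator (opts : List Int) (l : List Int) :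
    (l.map (fun p => if p ∈ opts then 1 else 0)).sum = l.countP (fun p => decide (p ∈ opts)) := by
  induction l with
  | nil => rfl
  | cons a t ih =>
    simp only [List.map_cons, List.sum_cons, List.countP_cons, ih]
    by_cases h : a ∈ opts <;> simp [h] <;> omega

-- the inverted index contains ol once at point p iff p is in ol's cluster
lemma pv_inv_count (previous_clusters : List (Int × List Int))
    (hk : (previous_clusters.map Prod.fst).Nodup) {ol : Int} {opts : List Int}
    (hm : (ol, opts) ∈ previous_clusters) (p : Int) :
    ((pvBInv previous_clusters).getD p []).count ol = if p ∈ opts then 1 else 0 := by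
  have hinv : pvBInv previous_clusters
      = (previous_clusters.flatMap (fun o => (PySem.Set.ofList o.2).map (fun q => (q, o.1)))).foldl
          (fun d pr => d.modify pr.1 [] (fun v => v ++ [pr.2])) PySem.Dict.empty := by
    rw [pvBInv, List.flatMap_def, List.foldl_flatten, List.foldl_map]
    apply PySem.List.foldl_congr_mem
    intro d o _
    rw [List.foldl_map]
  rw [hinv, PySem.Dict.getD_foldl_modify_append, PySem.Dict.getD_empty, List.nil_append,
    List.count_eq_countP, List.countP_map, List.countP_filter, List.countP_flatMap]
  exact pv_sum_congr_unique previous_clusters hk hm p _ (fun o _ => pv_countP_pair o ol p)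

-- the tally equals A's set-intersection size
lemma pv_counts_getD (previous_clusters : List (Int × List Int))
    (hk : (previous_clusters.map Prod.fst).Nodup) {ol : Int} {opts : List Int}
    (hm : (ol, opts) ∈ previous_clusters) (pts : List Int) :
    (pvBCounts (pvBInv previous_clusters) pts).getD ol 0 = pvAOverlap pts opts := by
  rw [pvBCounts]
  have hflat := pv_foldl_nested (fun p => (pvBInv previous_clusters).getD p [])
    (fun (c : PySem.Dict Int Int) (q : Int) => c.insert q (c.getD q 0 + 1))
    (PySem.Set.ofList pts) PySem.Dict.empty
  rw [hflat, PySem.Dict.getD_foldl_insert_add_one, PySem.Dict.getD_empty, zero_add,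
    List.count_flatMap]
  rw [show (List.map (List.count ol ∘ fun p => (pvBInv previous_clusters).getD p [])
        (PySem.Set.ofList pts))
      = (PySem.Set.ofList pts).map (fun p => if p ∈ opts then 1 else 0) from
    List.map_congr_left (fun q _ => pv_inv_count previous_clusters hk hm q)]
  rw [pv_sum_indicator opts, pvAOverlap]
  have hfil : PySem.Set.inter (PySem.Set.ofList pts) (PySem.Set.ofList opts)
      = (PySem.Set.ofList pts).filter (fun x => decide (x ∈ opts)) := by
    show List.filter _ _ = _
    apply List.filter_congr
    intro x _
    rw [Bool.eq_iff_iff]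
    simp [PySem.Set.mem_ofList]
  rw [hfil, ← List.countP_eq_length_filter]

lemma pv_select_eq (previous_clusters : List (Int × List Int))
    (hk : (previous_clusters.map Prod.fst).Nodup) (pts : List Int) :
    pvBSelect (previous_clusters.map Prod.fst) (pvBCounts (pvBInv previous_clusters) pts)
      = pvASelect previous_clusters pts := by
  rw [pvASelect, pvBSelect, List.foldl_map]
  apply PySem.List.foldl_congr_mem
  intro bm o hmem
  have ho : (o.1, o.2) ∈ previous_clusters := by
    rw [show ((o.1, o.2) : Int × List Int) = o from rfl]
    exact hmem
  simp only
  rw [pv_counts_getD previous_clusters hk ho pts]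

-- main loop invariant
lemma pv_loop (previous_clusters : List (Int × List Int))
    (hk : (previous_clusters.map Prod.fst).Nodup) (nf0 : PySem.Set Int) :
    ∀ (L : List (Int × List Int)) (m : PySem.Dict Int Int) (u : PySem.Set Int)
      (n : Int) (mo : PySem.Set Int) (f : List Int),
    (L.foldl (pvStepA previous_clusters)
        (m, PySem.Set.ofList ((previous_clusters.map Prod.fst).filter (fun ol => !(PySem.Set.contains mo ol))),
         f.foldl PySem.Set.add nf0, u, n)).1
      = (L.foldl (pvStepB previous_clusters (pvBInv previous_clusters)) (m, mo, f, n)).1 ∧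
    (L.foldl (pvStepA previous_clusters)
        (m, PySem.Set.ofList ((previous_clusters.map Prod.fst).filter (fun ol => !(PySem.Set.contains mo ol))),
         f.foldl PySem.Set.add nf0, u, n)).2.1
      = PySem.Set.ofList ((previous_clusters.map Prod.fst).filter
          (fun ol => !(PySem.Set.contains (L.foldl (pvStepB previous_clusters (pvBInv previous_clusters)) (m, mo, f, n)).2.1 ol))) ∧
    (L.foldl (pvStepA previous_clusters)
        (m, PySem.Set.ofList ((previous_clusters.map Prod.fst).filter (fun ol => !(PySem.Set.contains mo ol))),
         f.foldl PySem.Set.add nf0, u, n)).2.2.1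
      = (L.foldl (pvStepB previous_clusters (pvBInv previous_clusters)) (m, mo, f, n)).2.2.1.foldl PySem.Set.add nf0 := by
  intro L
  induction L with
  | nil => intro m u n mo f; exact ⟨rfl, rfl, rfl⟩
  | cons e t ih =>
    intro m u n mo f
    simp only [List.foldl_cons]
    rw [show pvStepB previous_clusters (pvBInv previous_clusters) (m, mo, f, n) e
        = (match (pvASelect previous_clusters e.2).1 with
           | some b => (m.insert e.1 b, PySem.Set.add mo b, f, n)
           | none => (m.insert e.1 n, mo, f ++ [n], n + 1)) from by
      rw [pvStepB, pv_select_eq previous_clusters hk e.2]]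
    rw [pvStepA]
    cases hbm : (pvASelect previous_clusters e.2).1 with
    | some b =>
      simp only
      rw [pv_discard_step]
      exact ih (m.insert e.1 b) u n (PySem.Set.add mo b) f
    | none =>
      simp only
      rw [show PySem.Set.add (f.foldl PySem.Set.add nf0) n
          = (f ++ [n]).foldl PySem.Set.add nf0 from by rw [List.foldl_append]; rfl]
      exact ih (m.insert e.1 n) (PySem.Set.add u n) (n + 1) mo (f ++ [n])

-- ===== VERDICT (by name: the statement is the Claim_ definition above) =====
theorem track_cluster_changes_spec : Claim_equal_track_cluster_changes := by
  intro previous_clusters new_clusters previous_labels _hdom hpre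
  obtain ⟨hk, _, _⟩ := hpre
  unfold Spec_track_cluster_changes
  rw [track_cluster_changes, track_cluster_changes_alt]
  rw [pv_max_ofList]
  have h0 : PySem.Set.ofList (previous_clusters.map Prod.fst)
      = PySem.Set.ofList ((previous_clusters.map Prod.fst).filter
          (fun ol => !(PySem.Set.contains PySem.Set.empty ol))) := by
    rw [show ((previous_clusters.map Prod.fst).filter
          (fun ol => !(PySem.Set.contains PySem.Set.empty ol))) = previous_clusters.map Prod.fst from by
      apply List.filter_eq_self.mpr
      intro a _
      rfl]
  rw [h0]
  obtain ⟨h1, h2, h3⟩ := pv_loop previous_clusters hk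
    (PySem.Set.ofList (new_clusters.map Prod.fst)) new_clusters PySem.Dict.empty
    (PySem.Set.ofList (previous_labels.map Prod.snd))
    (((PySem.List.max? (previous_labels.map Prod.snd) (fun x => x)).getD (-1)) + 1)
    PySem.Set.empty []
  rw [show ([] : List Int).foldl PySem.Set.add (PySem.Set.ofList (new_clusters.map Prod.fst))
      = PySem.Set.ofList (new_clusters.map Prod.fst) from rfl] at h1 h2 h3
  exact Prod.ext (by rw [h1]) (Prod.ext (by exact h3) (by exact h2))
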